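-- pv_equiv track=rewrite | github.com/widelec9/codewars | kata/5kyu/python/how_many_numbers_2.py | cons_sum_below_max
-- ===== SOURCE A (Python) =====
-- def cons_sum_below_max(n, maxs):
--     if n <= 9999:
--         return sum(map(int, str(n))) <= maxs
--     else:
--         for i in range(0, len(str(n)) - 4 + 1):
--             if sum(map(int, str(n)[i:i+4])) > maxs:
--                 return False
--         return True
-- ===== SOURCE B (Python) =====
-- def cons_sum_below_max(n, maxs):
--     digits = [int(c) for c in str(n)]
--     pre = [0]
--     for d in digits:
--         pre.append(pre[-1] + d)
--     if n <= 9999: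
--         return pre[-1] <= maxs
--     return all(pre[i + 4] - pre[i] <= maxs for i in range(len(digits) - 3))
-- ===== Notes on version B (the rewrite author's own statement) =====
-- stated objective: alternative
-- what changed: B converts the digits once and builds a prefix-sum table, testing each 4-digit window by one subtraction pre[i+4]-pre[i] instead of A's per-window rescan of a fresh str(n) slice.
import Mathlib
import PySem

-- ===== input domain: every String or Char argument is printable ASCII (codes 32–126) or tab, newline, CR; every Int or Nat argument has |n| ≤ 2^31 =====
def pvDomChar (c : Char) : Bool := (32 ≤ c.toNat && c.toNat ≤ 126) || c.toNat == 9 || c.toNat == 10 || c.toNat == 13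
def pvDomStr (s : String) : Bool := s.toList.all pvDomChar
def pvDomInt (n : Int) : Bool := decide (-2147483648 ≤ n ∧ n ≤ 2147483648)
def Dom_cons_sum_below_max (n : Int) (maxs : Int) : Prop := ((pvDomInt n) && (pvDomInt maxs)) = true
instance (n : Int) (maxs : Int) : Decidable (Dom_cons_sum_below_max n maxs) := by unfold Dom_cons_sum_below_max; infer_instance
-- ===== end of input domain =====

-- B replaces A's per-window rescan of str(n) slices by a prefix-sum table queried by subtraction (alternative decomposition, same cost class).

-- int(c): exact for the decimal digit characters str(n) yields under Pre_ (0 ≤ n)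
def pvDigitVal (c : Char) : Int := (c.toNat : Int) - 48

-- ===== PORT A =====
-- the for-loop over range(0, len(str(n)) - 4 + 1) with early return False
def pvALoop (s : List Char) (maxs : Int) : List Int → Bool
  | [] => true
  | i :: rest =>
      if ((PySem.List.slice s (some i) (some (i + 4))).map pvDigitVal).sum > maxs then false
      else pvALoop s maxs rest

def cons_sum_below_max (n : Int) (maxs : Int) : Bool :=
  if n ≤ 9999 then
    decide (((PySem.Int.toStr n).toList.map pvDigitVal).sum ≤ maxs)
  else
    pvALoop (PySem.Int.toStr n).toList maxs
      (PySem.List.pyRange 0 (((PySem.Int.toStr n).toList.length : Int) - 4 + 1) 1)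

-- ===== PORT B =====
-- the loop 'pre=[0]; for d in digits: pre.append(pre[-1]+d)' (acc carries pre[-1])
def pvPre (acc : Int) : List Int → List Int
  | [] => [acc]
  | d :: rest => acc :: pvPre (acc + d) rest

def cons_sum_below_max_alt (n : Int) (maxs : Int) : Bool :=
  let digits := (PySem.Int.toStr n).toList.map pvDigitVal
  let pre := pvPre 0 digits
  if n ≤ 9999 then
    decide (PySem.List.pyGetD pre (-1) 0 ≤ maxs)
  else
    (PySem.List.pyRange 0 ((digits.length : Int) - 3) 1).all
      (fun i => decide (PySem.List.pyGetD pre (i + 4) 0 - PySem.List.pyGetD pre i 0 ≤ maxs))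

-- ===== PRECONDITION & SPEC =====
-- Pre_ excludes negative n: there str(n) starts with '-' and Python's int('-') raises ValueError in A (and in B alike).
def Pre_cons_sum_below_max (n : Int) (_maxs : Int) : Prop := 0 ≤ n
instance (n : Int) (maxs : Int) : Decidable (Pre_cons_sum_below_max n maxs) := by
  unfold Pre_cons_sum_below_max; infer_instance

def pvWitness_cons_sum_below_max : Int × Int := (123456, 15)

def Spec_cons_sum_below_max (n : Int) (maxs : Int) (out : Bool) : Prop := out = cons_sum_below_max_alt n maxs
instance (n : Int) (maxs : Int) (out : Bool) : Decidable (Spec_cons_sum_below_max n maxs out) := by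
  unfold Spec_cons_sum_below_max; infer_instance

-- ===== CLAIM (what is proved, stated in full; the proofs are below) =====
def Claim_equal_cons_sum_below_max : Prop := ∀ (n : Int) (maxs : Int), Dom_cons_sum_below_max n maxs → Pre_cons_sum_below_max n maxs → Spec_cons_sum_below_max n maxs (cons_sum_below_max n maxs)

-- ===== LEMMAS AND PROOFS =====

theorem pvPre_ne_nil (s : List Int) (acc : Int) : pvPre acc s ≠ [] := by
  cases s <;> simp [pvPre]

theorem pvPre_getLast (s : List Int) (acc : Int) (h : pvPre acc s ≠ []) :
    (pvPre acc s).getLast h = acc + s.sum := by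
  induction s generalizing acc with
  | nil => simp [pvPre]
  | cons d rest ih =>
      show (acc :: pvPre (acc + d) rest).getLast (by simp) = acc + (d :: rest).sum
      rw [List.getLast_cons (pvPre_ne_nil rest (acc + d)), ih]
      simp only [List.sum_cons]; ring

theorem pvPre_getD (s : List Int) (acc : Int) (k : Nat) (hk : k ≤ s.length) :
    (pvPre acc s).getD k 0 = acc + (s.take k).sum := by
  induction s generalizing acc k with
  | nil =>
      simp only [List.length_nil, Nat.le_zero] at hk
      subst hk; simp [pvPre]
  | cons d rest ih =>
      cases k with
      | zero => simp [pvPre]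
      | succ k =>
          rw [show pvPre acc (d :: rest) = acc :: pvPre (acc + d) rest from rfl]
          simp only [List.getD_cons_succ, List.take_succ_cons, List.sum_cons]
          rw [ih (acc + d) k (by simpa using hk)]
          ring

theorem pvALoop_eq_all (s : List Char) (maxs : Int) (Q : Int → Bool) (l : List Int)
    (h : ∀ i ∈ l, Q i = decide (((PySem.List.slice s (some i) (some (i + 4))).map pvDigitVal).sum ≤ maxs)) :
    pvALoop s maxs l = l.all Q := by
  induction l with
  | nil => simp [pvALoop]
  | cons i rest ih =>
      simp only [pvALoop, List.all_cons]
      rw [h i (by simp)]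
      by_cases hgt : ((PySem.List.slice s (some i) (some (i + 4))).map pvDigitVal).sum > maxs
      · simp [hgt, not_le.mpr hgt]
      · simp only [if_neg hgt]
        rw [ih (fun j hj => h j (by simp [hj]))]
        simp [le_of_not_gt hgt]

-- one window: slice sum = prefix-sum difference
theorem window_eq_preDiff (s : List Char) (i : Int) (h0 : 0 ≤ i)
    (h4 : i + 4 ≤ ((s.map pvDigitVal).length : Int)) :
    PySem.List.pyGetD (pvPre 0 (s.map pvDigitVal)) (i + 4) 0
      - PySem.List.pyGetD (pvPre 0 (s.map pvDigitVal)) i 0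
      = ((PySem.List.slice s (some i) (some (i + 4))).map pvDigitVal).sum := by
  set ds := s.map pvDigitVal with hds
  obtain ⟨j, rfl⟩ : ∃ j : Nat, i = (j : Int) := ⟨i.toNat, (Int.toNat_of_nonneg h0).symm⟩
  have hj4 : j + 4 ≤ ds.length := by
    have := h4; omega
  have hcast : ((j : Int) + 4) = ((j + 4 : Nat) : Int) := by push_cast; ring
  rw [hcast, PySem.List.pyGetD_natCast, PySem.List.pyGetD_natCast]
  rw [pvPre_getD ds 0 (j + 4) hj4, pvPre_getD ds 0 j (by omega)]
  rw [PySem.List.slice_natCast]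
  have h44 : j + 4 - j = 4 := by omega
  rw [h44]
  have hsplit : ds.take (j + 4) = ds.take j ++ (ds.drop j).take 4 := by
    rw [← List.take_add]
  rw [hsplit, List.sum_append, List.map_take, List.map_drop, ← hds]
  ring

-- ===== VERDICT (by name: the statement is the Claim_ definition above) =====
theorem cons_sum_below_max_spec : Claim_equal_cons_sum_below_max := by
  intro n maxs _ _
  unfold Spec_cons_sum_below_max cons_sum_below_max cons_sum_below_max_alt
  set s := (PySem.Int.toStr n).toList with hs
  set ds := s.map pvDigitVal with hds
  by_cases hle : n ≤ 9999
  · simp only [if_pos hle]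
    rw [PySem.List.pyGetD_neg_one (pvPre 0 ds) 0 (pvPre_ne_nil ds 0), pvPre_getLast ds 0 (pvPre_ne_nil ds 0)]
    simp
  · simp only [if_neg hle]
    have hb : ((s.length : Int) - 4 + 1) = ((ds.length : Int) - 3) := by
      simp [hds]; omega
    rw [hb]
    apply pvALoop_eq_all
    intro i hi
    have hmem := PySem.List.mem_pyRange_one.mp hi
    have h0 : 0 ≤ i := hmem.1
    have h4 : i + 4 ≤ ((ds.length : Int)) := by omega
    rw [← window_eq_preDiff s i h0 (by exact h4)]
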